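-- pv_equiv track=rewrite | github.com/devsulemangondal/dish_genie | generate_l10n_mapping.py | convert_to_old_key
-- ===== SOURCE A (Python) =====
-- def convert_to_old_key(key):
--     """Convert ARB key (e.g., 'commonHome') back to old format (e.g., 'common.home')"""
--     # Insert dots before capital letters (except the first one)
--     result = key[0].lower()
--     for char in key[1:]:
--         if char.isupper():
--             result += '.' + char.lower()
--         else:
--             result += char
--     return result
-- ===== SOURCE B (Python) =====
-- def convert_to_old_key(key):
--     """Convert ARB key (e.g., 'commonHome') back to old format (e.g., 'common.home')"""
--     segments = []
--     current = key[0]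
--     for char in key[1:]:
--         if char.isupper():
--             segments.append(current)
--             current = char
--         else:
--             current += char
--     segments.append(current)
--     return '.'.join(s[0].lower() + s[1:] for s in segments)
-- ===== Notes on version B (the rewrite author's own statement) =====
-- stated objective: alternative
-- what changed: B tokenizes the key into camelCase segments (starting a new segment at each uppercase char) and then dot-joins them after lowercasing each segment's first char, instead of accumulating the output string char by char.
import Mathlib
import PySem

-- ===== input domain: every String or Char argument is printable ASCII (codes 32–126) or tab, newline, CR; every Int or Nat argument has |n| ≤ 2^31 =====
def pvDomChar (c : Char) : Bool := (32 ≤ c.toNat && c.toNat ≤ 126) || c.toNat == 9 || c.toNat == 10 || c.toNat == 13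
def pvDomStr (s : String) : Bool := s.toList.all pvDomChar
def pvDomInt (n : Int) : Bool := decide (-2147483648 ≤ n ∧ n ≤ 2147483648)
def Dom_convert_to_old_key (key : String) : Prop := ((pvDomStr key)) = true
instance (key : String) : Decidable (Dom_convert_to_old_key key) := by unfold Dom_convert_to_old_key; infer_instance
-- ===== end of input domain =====

-- B tokenizes the key into camelCase segments and dot-joins them after
-- lowercasing each segment's first char, instead of accumulating the output
-- string char by char (alternative decomposition, same cost).


-- ===== PORT A =====
-- result = key[0].lower(); for char in key[1:]: … (char-by-char accumulation)
def convert_to_old_key (key : String) : String :=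
  match key.toList with
  | [] => ""   -- unreachable under Pre_ (Python raises IndexError on "")
  | c :: rest =>
    String.mk (rest.foldl
      (fun acc ch =>
        if PySem.Chars.isupper ch then acc ++ ['.', PySem.Chars.lowerChar ch]
        else acc ++ [ch])
      [PySem.Chars.lowerChar c])

-- ===== PORT B =====
-- the segment loop of Source B: (remaining chars, current segment, finished segments)
def pvSegLoop : List Char → List Char → List (List Char) → List (List Char)
  | [], cur, segs => segs ++ [cur]
  | ch :: rest, cur, segs =>
    if PySem.Chars.isupper ch then pvSegLoop rest [ch] (segs ++ [cur])
    else pvSegLoop rest (cur ++ [ch]) segs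

-- s[0].lower() + s[1:]
def pvLowFirst : List Char → List Char
  | [] => []
  | c :: cs => PySem.Chars.lowerChar c :: cs

def convert_to_old_key_alt (key : String) : String :=
  match key.toList with
  | [] => ""   -- unreachable under Pre_ (Python raises IndexError on "")
  | c :: rest =>
    String.mk (PySem.Chars.join ['.'] ((pvSegLoop rest [c] []).map pvLowFirst))

-- ===== PRECONDITION & SPEC =====
-- Pre_ excludes only the empty string, on which Python A raises IndexError (key[0]).
def Pre_convert_to_old_key (key : String) : Prop := key ≠ ""
instance (key : String) : Decidable (Pre_convert_to_old_key key) := by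
  unfold Pre_convert_to_old_key; infer_instance
def pvWitness_convert_to_old_key : String := "commonHome"

def Spec_convert_to_old_key (key : String) (out : String) : Prop := out = convert_to_old_key_alt key
instance (key : String) (out : String) : Decidable (Spec_convert_to_old_key key out) := by unfold Spec_convert_to_old_key; infer_instance

-- ===== CLAIM (what is proved, stated in full; the proofs are below) =====
def Claim_equal_convert_to_old_key : Prop := ∀ (key : String), Dom_convert_to_old_key key → Pre_convert_to_old_key key → Spec_convert_to_old_key key (convert_to_old_key key)

-- ===== LEMMAS AND PROOFS =====

-- appending a char to the LAST segment appends it to the join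
theorem pv_join_snoc_append (xs : List (List Char)) (y : List Char) (ch : Char) :
    PySem.Chars.join ['.'] (xs ++ [y ++ [ch]]) = PySem.Chars.join ['.'] (xs ++ [y]) ++ [ch] := by
  induction xs with
  | nil => simp [PySem.Chars.join_singleton]
  | cons a t ih =>
    cases t with
    | nil => simp [PySem.Chars.join_cons_cons, PySem.Chars.join_singleton]
    | cons b u =>
      simp only [List.cons_append] at ih ⊢
      rw [PySem.Chars.join_cons_cons, PySem.Chars.join_cons_cons, ih]
      simp

-- starting a NEW segment adds a '.' and the segment to the join
theorem pv_join_snoc (xs : List (List Char)) (y : List Char) (h : xs ≠ []) :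
    PySem.Chars.join ['.'] (xs ++ [y]) = PySem.Chars.join ['.'] xs ++ '.' :: y := by
  induction xs with
  | nil => exact absurd rfl h
  | cons a t ih =>
    cases t with
    | nil => simp [PySem.Chars.join_cons_cons, PySem.Chars.join_singleton]
    | cons b u =>
      simp only [List.cons_append] at ih ⊢
      rw [PySem.Chars.join_cons_cons, ih (by simp), PySem.Chars.join_cons_cons]
      simp

theorem pv_lowFirst_snoc (cur : List Char) (ch : Char) (h : cur ≠ []) :
    pvLowFirst (cur ++ [ch]) = pvLowFirst cur ++ [ch] := by
  cases cur with
  | nil => exact absurd rfl h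
  | cons c cs => simp [pvLowFirst]

-- the rendered output of the finished segments plus the current one
def pvRender (segs : List (List Char)) (cur : List Char) : List Char :=
  PySem.Chars.join ['.'] ((segs ++ [cur]).map pvLowFirst)

theorem pv_render_ext (segs : List (List Char)) (cur : List Char) (ch : Char)
    (h : cur ≠ []) : pvRender segs (cur ++ [ch]) = pvRender segs cur ++ [ch] := by
  unfold pvRender
  rw [List.map_append, List.map_singleton, pv_lowFirst_snoc cur ch h,
      pv_join_snoc_append, List.map_append, List.map_singleton]

theorem pv_render_new (segs : List (List Char)) (cur : List Char) (ch : Char) :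
    pvRender (segs ++ [cur]) [ch] = pvRender segs cur ++ '.' :: [PySem.Chars.lowerChar ch] := by
  unfold pvRender
  rw [List.map_append, List.map_singleton, pv_join_snoc _ _ (by simp)]
  simp [pvLowFirst]

-- invariant: A's fold from the rendered state equals B's join of the final segments
theorem pv_inv (rest : List Char) : ∀ (segs : List (List Char)) (cur : List Char), cur ≠ [] →
    rest.foldl
      (fun acc ch =>
        if PySem.Chars.isupper ch then acc ++ ['.', PySem.Chars.lowerChar ch]
        else acc ++ [ch])
      (pvRender segs cur)
    = PySem.Chars.join ['.'] ((pvSegLoop rest cur segs).map pvLowFirst) := by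
  induction rest with
  | nil => intro segs cur h; simp [pvSegLoop, pvRender]
  | cons ch rest ih =>
    intro segs cur h
    rw [List.foldl_cons]
    by_cases hu : PySem.Chars.isupper ch
    · have : pvRender segs cur ++ ['.', PySem.Chars.lowerChar ch]
          = pvRender (segs ++ [cur]) [ch] := by rw [pv_render_new]
      simp only [hu, if_pos, this]
      rw [ih (segs ++ [cur]) [ch] (by simp)]
      simp [pvSegLoop, hu]
    · simp only [hu, if_false, Bool.false_eq_true]
      rw [← pv_render_ext segs cur ch h, ih segs (cur ++ [ch]) (by simp)]
      simp [pvSegLoop, hu]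

-- ===== VERDICT (by name: the statement is the Claim_ definition above) =====
theorem convert_to_old_key_spec : Claim_equal_convert_to_old_key := by
  intro key _ _
  unfold Spec_convert_to_old_key convert_to_old_key convert_to_old_key_alt
  cases h : key.toList with
  | nil => rfl
  | cons c rest =>
    dsimp only
    refine congrArg String.mk ?_
    have h0 : [PySem.Chars.lowerChar c] = pvRender [] [c] := by
      simp [pvRender, pvLowFirst, PySem.Chars.join_singleton]
    rw [h0, pv_inv rest [] [c] (by simp)]
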